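-- pv_equiv track=rewrite | github.com/ZornsLemma/basictool | utils/basiclabel.py | break_string_at_literals
-- ===== SOURCE A (Python) =====
-- def break_string_at_literals(line):
--     in_literal = False
--     i = 0
--     output = []
--     fragment = ""
--     while i < len(line):
--         c = line[i]
--         if c == '"':
--             if not in_literal:
--                 in_literal = not in_literal
--                 output.append(fragment)
--                 fragment = ""
--                 fragment += c
--                 i += 1
--             else:
--                 if (i + 1) < len(line) and line[i + 1] == '"':
--                     # This is an escaped quote within the literal.
--                     fragment += '""'
--                     i += 2
--                 else:
--                     fragment += c
--                     i += 1
--                     in_literal = not in_literal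
--                     output.append(fragment)
--                     fragment = ""
--         else:
--             fragment += c
--             i += 1
--     if len(fragment) > 0:
--         output.append(fragment)
--     return output
-- ===== SOURCE B (Python) =====
-- def break_string_at_literals(line):
--     out = []
--     i = 0
--     n = len(line)
--     while True:
--         j = line.find('"', i)
--         if j == -1:
--             if i < n:
--                 out.append(line[i:])
--             return out
--         k = j + 1
--         while k < n:
--             if line[k] == '"':
--                 if k + 1 < n and line[k + 1] == '"':
--                     k += 2
--                 else:
--                     k += 1
--                     break
--             else:
--                 k += 1
--         out.append(line[i:j])
--         out.append(line[j:k])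
--         i = k
-- ===== Notes on version B (the rewrite author's own statement) =====
-- stated objective: faster
-- what changed: Replaces A's per-character Python scanner (in_literal flag plus a fragment accumulator grown one char at a time) by find-and-slice: str.find jumps to the next quote, an inner scan locates the literal's end, and whole slices are emitted.
import Mathlib
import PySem

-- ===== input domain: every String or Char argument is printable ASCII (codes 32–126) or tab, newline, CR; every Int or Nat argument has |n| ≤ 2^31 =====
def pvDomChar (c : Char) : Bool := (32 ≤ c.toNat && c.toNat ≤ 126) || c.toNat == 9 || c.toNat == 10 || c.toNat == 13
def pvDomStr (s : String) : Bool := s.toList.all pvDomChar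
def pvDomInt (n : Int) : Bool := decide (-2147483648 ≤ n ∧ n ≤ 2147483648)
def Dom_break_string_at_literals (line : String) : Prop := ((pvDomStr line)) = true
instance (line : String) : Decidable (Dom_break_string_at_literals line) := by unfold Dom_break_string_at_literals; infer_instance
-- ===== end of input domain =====

-- B replaces A's char-by-char flag machine by find-and-slice: jump to the next quote,
-- scan the literal's end once, and emit whole slices (objective: idiomatic/alternative).

-- ===== PORT A =====
-- A's while loop over index i with state (in_literal, output, fragment); fuel (≥ number of
-- remaining loop iterations, each consumes ≥ 1) makes the recursion structural; fragment is
-- a List Char accumulator mirroring Python string +=, turned into a String when appended.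
def aLoop (cs : List Char) (fuel : Nat) (i : Nat) (inLit : Bool) (out : List String) (frag : List Char) : List String :=
  match fuel with
  | 0 => if frag.length > 0 then out ++ [String.ofList frag] else out
  | fuel + 1 =>
    if h : i < cs.length then
      let c := cs[i]
      if c = '"' then
        if !inLit then
          aLoop cs fuel (i + 1) true (out ++ [String.ofList frag]) ['"']
        else
          if hh : i + 1 < cs.length then
            if cs[i + 1] = '"' then
              aLoop cs fuel (i + 2) true out (frag ++ ['"', '"'])
            else
              aLoop cs fuel (i + 1) false (out ++ [String.ofList (frag ++ ['"'])]) []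
          else
            aLoop cs fuel (i + 1) false (out ++ [String.ofList (frag ++ ['"'])]) []
      else
        aLoop cs fuel (i + 1) inLit out (frag ++ [c])
    else
      if frag.length > 0 then out ++ [String.ofList frag] else out

def break_string_at_literals (line : String) : List String :=
  aLoop line.toList line.toList.length 0 false [] []

-- ===== PORT B =====
-- line.find('"', i): index of the first '"' at position ≥ i, none if there is none.
def findQ (cs : List Char) (fuel : Nat) (i : Nat) : Option Nat :=
  match fuel with
  | 0 => none
  | fuel + 1 =>
    if h : i < cs.length then
      if cs[i] = '"' then some i else findQ cs fuel (i + 1)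
    else none

-- Source B's inner while loop: end index (exclusive) of the literal whose first char after
-- the opening quote is at k.
def litEnd (cs : List Char) (fuel : Nat) (k : Nat) : Nat :=
  match fuel with
  | 0 => k
  | fuel + 1 =>
    if h : k < cs.length then
      if cs[k] = '"' then
        if hh : k + 1 < cs.length then
          if cs[k + 1] = '"' then litEnd cs fuel (k + 2) else k + 1
        else k + 1
      else litEnd cs fuel (k + 1)
    else k

-- Source B's outer loop: find the next quote, take the non-literal slice and the literal slice.
def bGo (cs : List Char) (fuel : Nat) (i : Nat) (out : List String) : List String :=
  match fuel with
  | 0 => out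
  | fuel + 1 =>
    match findQ cs cs.length i with
    | none => if i < cs.length then out ++ [String.ofList (cs.drop i)] else out
    | some j =>
      let k := litEnd cs cs.length (j + 1)
      bGo cs fuel k (out ++ [String.ofList (cs.extract i j), String.ofList (cs.extract j k)])

def break_string_at_literals_alt (line : String) : List String :=
  bGo line.toList (line.toList.length + 1) 0 []

-- ===== PRECONDITION & SPEC =====
def Spec_break_string_at_literals (line : String) (out : List String) : Prop := out = break_string_at_literals_alt line
instance (line : String) (out : List String) : Decidable (Spec_break_string_at_literals line out) := by unfold Spec_break_string_at_literals; infer_instance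

-- ===== CLAIM (what is proved, stated in full; the proofs are below) =====
def Claim_equal_break_string_at_literals : Prop := ∀ (line : String), Dom_break_string_at_literals line → Spec_break_string_at_literals line (break_string_at_literals line)

-- ===== LEMMAS AND PROOFS =====

theorem extract_self (cs : List Char) (i : Nat) : cs.extract i i = [] := by
  simp [List.extract_eq_take_drop]

-- extract j e = cs[j] :: extract (j+1) e when j in range and j < e
theorem extract_cons (cs : List Char) (j e : Nat) (hj : j < cs.length) (hje : j < e) :
    cs.extract j e = cs[j] :: cs.extract (j + 1) e := by
  rw [List.extract_eq_take_drop, List.extract_eq_take_drop, List.drop_eq_getElem_cons hj]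
  have h : e - j = (e - (j + 1)) + 1 := by omega
  rw [h, List.take_succ_cons]

theorem findQ_spec (cs : List Char) : ∀ (f i j : Nat), findQ cs f i = some j →
    i ≤ j ∧ ∃ hj : j < cs.length, cs[j] = '"' := by
  intro f
  induction f with
  | zero => intro i j h; simp [findQ] at h
  | succ f ih =>
    intro i j h
    rw [findQ] at h
    by_cases hi : i < cs.length
    · simp only [hi, dif_pos] at h
      by_cases hq : cs[i] = '"'
      · simp [hq] at h; subst h; exact ⟨le_refl _, hi, hq⟩
      · rw [if_neg hq] at h
        obtain ⟨h1, h2⟩ := ih (i + 1) j h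
        exact ⟨by omega, h2⟩
    · simp [hi] at h

theorem findQ_irrel (cs : List Char) : ∀ (f f' i : Nat), cs.length - i ≤ f → cs.length - i ≤ f' →
    findQ cs f i = findQ cs f' i := by
  intro f
  induction f with
  | zero =>
    intro f' i h h'
    have hi : ¬ i < cs.length := by omega
    cases f' with
    | zero => rfl
    | succ f' => rw [findQ, findQ]; simp [hi]
  | succ f ih =>
    intro f' i h h'
    by_cases hi : i < cs.length
    · cases f' with
      | zero => omega
      | succ f' =>
        rw [findQ, findQ]
        simp only [hi, dif_pos]
        by_cases hq : cs[i] = '"'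
        · simp [hq]
        · rw [if_neg hq, if_neg hq, ih f' (i + 1) (by omega) (by omega)]
    · cases f' with
      | zero => rw [findQ, findQ]; simp [hi]
      | succ f' => rw [findQ, findQ]; simp [hi]

theorem litEnd_ge (cs : List Char) : ∀ (f k : Nat), k ≤ litEnd cs f k := by
  intro f
  induction f with
  | zero => intro k; simp [litEnd]
  | succ f ih =>
    intro k
    rw [litEnd]
    by_cases hk : k < cs.length
    · by_cases hq : cs[k] = '"'
      · by_cases hh : k + 1 < cs.length
        · by_cases hq2 : cs[k + 1]'hh = '"'
          · simp only [hk, dif_pos, hq, if_pos, hh, hq2]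
            have := ih (k + 2); omega
          · simp [hk, hq, hh, hq2]
        · simp [hk, hq, hh]
      · simp only [hk, dif_pos]
        rw [if_neg hq]
        have := ih (k + 1); omega
    · simp [hk]

theorem litEnd_irrel (cs : List Char) : ∀ (f f' k : Nat), cs.length - k ≤ f → cs.length - k ≤ f' →
    litEnd cs f k = litEnd cs f' k := by
  intro f
  induction f with
  | zero =>
    intro f' k h h'
    have hk : ¬ k < cs.length := by omega
    cases f' with
    | zero => rfl
    | succ f' => rw [litEnd, litEnd]; simp [hk]
  | succ f ih =>
    intro f' k h h'
    by_cases hk : k < cs.length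
    · cases f' with
      | zero => omega
      | succ f' =>
        rw [litEnd, litEnd]
        simp only [hk, dif_pos]
        by_cases hq : cs[k] = '"'
        · by_cases hh : k + 1 < cs.length
          · by_cases hq2 : cs[k + 1]'hh = '"'
            · simp only [hq, if_pos, hh, dif_pos, hq2]
              exact ih f' (k + 2) (by omega) (by omega)
            · simp [hq, hh, hq2]
          · simp [hq, hh]
        · rw [if_neg hq, if_neg hq]
          exact ih f' (k + 1) (by omega) (by omega)
    · cases f' with
      | zero => rw [litEnd, litEnd]; simp [hk]
      | succ f' => rw [litEnd, litEnd]; simp [hk]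

theorem aLoop_irrel (cs : List Char) : ∀ (f f' i : Nat) (inLit : Bool) (out : List String)
    (frag : List Char), cs.length - i ≤ f → cs.length - i ≤ f' →
    aLoop cs f i inLit out frag = aLoop cs f' i inLit out frag := by
  intro f
  induction f with
  | zero =>
    intro f' i inLit out frag h h'
    have hi : ¬ i < cs.length := by omega
    cases f' with
    | zero => rfl
    | succ f' => rw [aLoop, aLoop]; simp [hi]
  | succ f ih =>
    intro f' i inLit out frag h h'
    by_cases hi : i < cs.length
    · cases f' with
      | zero => omega
      | succ f' =>
        rw [aLoop, aLoop]
        simp only [hi, dif_pos]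
        by_cases hq : cs[i] = '"'
        · cases inLit with
          | false => simp only [hq, if_pos, Bool.not_false, if_true]
                     exact ih f' (i + 1) true _ _ (by omega) (by omega)
          | true =>
            simp only [hq, if_pos, Bool.not_true, Bool.false_eq_true, if_false]
            by_cases hh : i + 1 < cs.length
            · by_cases hq2 : cs[i + 1]'hh = '"'
              · simp only [hh, dif_pos, hq2, if_pos]
                exact ih f' (i + 2) true _ _ (by omega) (by omega)
              · simp only [hh, dif_pos]
                rw [if_neg hq2, if_neg hq2]
                exact ih f' (i + 1) false _ _ (by omega) (by omega)
            · simp only [hh, dif_neg, not_false_iff]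
              exact ih f' (i + 1) false _ _ (by omega) (by omega)
        · rw [if_neg hq, if_neg hq]
          exact ih f' (i + 1) inLit _ _ (by omega) (by omega)
    · cases f' with
      | zero => rw [aLoop, aLoop]; simp [hi]
      | succ f' => rw [aLoop, aLoop]; simp [hi]

theorem bGo_irrel (cs : List Char) : ∀ (f f' i : Nat) (out : List String),
    cs.length - i < f → cs.length - i < f' → bGo cs f i out = bGo cs f' i out := by
  intro f
  induction f with
  | zero => intro f' i out h; omega
  | succ f ih =>
    intro f' i out h h'
    cases f' with
    | zero => omega
    | succ f' =>
      rw [bGo, bGo]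
      cases hf : findQ cs cs.length i with
      | none => rfl
      | some j =>
        simp only []
        obtain ⟨h1, h2, h3⟩ := findQ_spec cs cs.length i j hf
        have he := litEnd_ge cs cs.length (j + 1)
        exact ih f' (litEnd cs cs.length (j + 1)) _ (by omega) (by omega)

-- A's non-literal scan, parametrised by the pending fragment.
theorem nonlit (cs : List Char) : ∀ (f i : Nat) (out : List String) (frag : List Char),
    cs.length - i ≤ f →
    aLoop cs f i false out frag =
      match findQ cs cs.length i with
      | none => if frag.length > 0 ∨ i < cs.length then out ++ [String.ofList (frag ++ cs.drop i)] else out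
      | some j => aLoop cs f (j + 1) true (out ++ [String.ofList (frag ++ cs.extract i j)]) ['"'] := by
  intro f
  induction f with
  | zero =>
    intro i out frag h
    have hi : ¬ i < cs.length := by omega
    rw [findQ_irrel cs cs.length 0 i (by omega) (by omega)]
    rw [aLoop, findQ]
    rw [List.drop_eq_nil_of_le (by omega)]
    split_ifs with h1 h2 <;> simp_all <;> omega
  | succ f ih =>
    intro i out frag h
    by_cases hi : i < cs.length
    · by_cases hq : cs[i] = '"'
      · have hfq : findQ cs cs.length i = some i := by
          rw [findQ_irrel cs cs.length (f + 1) i (by omega) (by omega), findQ]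
          simp [hi, hq]
        rw [hfq, aLoop]
        simp only [hi, dif_pos, hq, if_pos, Bool.not_false, if_true, extract_self]
        rw [aLoop_irrel cs f (f + 1) (i + 1) true _ _ (by omega) (by omega)]
        simp
      · have hfq : findQ cs cs.length i = findQ cs cs.length (i + 1) := by
          rw [findQ_irrel cs cs.length (f + 1) i (by omega) (by omega), findQ]
          simp only [hi, dif_pos]
          rw [if_neg hq]
          exact findQ_irrel cs f cs.length (i + 1) (by omega) (by omega)
        rw [hfq, aLoop]
        simp only [hi, dif_pos]
        rw [if_neg hq, ih (i + 1) out (frag ++ [cs[i]]) (by omega)]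
        cases hf : findQ cs cs.length (i + 1) with
        | none =>
          rw [List.drop_eq_getElem_cons hi]
          simp
        | some j =>
          obtain ⟨h1, h2, h3⟩ := findQ_spec cs cs.length (i + 1) j hf
          simp only []
          rw [aLoop_irrel cs f (f + 1) (j + 1) true _ _ (by omega) (by omega),
              extract_cons cs i j hi (by omega)]
          simp
    · rw [findQ_irrel cs cs.length 0 i (by omega) (by omega), findQ, aLoop]
      simp only [hi, dif_neg, not_false_iff]
      rw [List.drop_eq_nil_of_le (by omega)]
      split_ifs with h1 h2 <;> simp_all

-- joint induction: literal mode agrees with litEnd+slice; non-literal mode agrees with bGo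
theorem joint (cs : List Char) : ∀ (f i : Nat), cs.length - i ≤ f →
    (∀ out frag, frag ≠ [] →
      aLoop cs f i true out frag =
        bGo cs (cs.length + 1) (litEnd cs cs.length i)
          (out ++ [String.ofList (frag ++ cs.extract i (litEnd cs cs.length i))])) ∧
    (∀ out, aLoop cs f i false out [] = bGo cs (cs.length + 1) i out) := by
  intro f
  induction f with
  | zero =>
    intro i h
    have hi : ¬ i < cs.length := by omega
    have hfq : findQ cs cs.length i = none := by
      rw [findQ_irrel cs cs.length 0 i (by omega) (by omega), findQ]
    have hle : litEnd cs cs.length i = i := by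
      rw [litEnd_irrel cs cs.length 0 i (by omega) (by omega), litEnd]
    constructor
    · intro out frag hfrag
      rw [aLoop, hle, extract_self, bGo, hfq]
      simp [hi, List.length_pos_iff, hfrag]
    · intro out
      rw [aLoop, bGo, hfq]
      simp [hi]
  | succ f ih =>
    intro i h
    constructor
    · -- literal mode
      intro out frag hfrag
      by_cases hi : i < cs.length
      swap
      · have hfq : findQ cs cs.length i = none := by
          rw [findQ_irrel cs cs.length 0 i (by omega) (by omega), findQ]
        have hle : litEnd cs cs.length i = i := by
          rw [litEnd_irrel cs cs.length 0 i (by omega) (by omega), litEnd]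
        rw [aLoop, hle, extract_self, bGo, hfq]
        simp [hi, List.length_pos_iff, hfrag]
      by_cases hq : cs[i] = '"'
      · by_cases hh : i + 1 < cs.length
        · by_cases hq2 : cs[i + 1]'hh = '"'
          · -- escaped quote
            rw [aLoop]
            simp only [hi, dif_pos, hq, if_pos, hh, hq2, Bool.not_true, Bool.false_eq_true,
              if_false]
            rw [(ih (i + 2) (by omega)).1 out (frag ++ ['"', '"']) (by simp)]
            have hle : litEnd cs cs.length i = litEnd cs cs.length (i + 2) := by
              rw [litEnd_irrel cs cs.length (cs.length + 1) i (by omega) (by omega), litEnd]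
              simp only [hi, dif_pos, hq, if_pos, hh, hq2]
            have he := litEnd_ge cs cs.length (i + 2)
            rw [hle, extract_cons cs i _ hi (by omega),
                extract_cons cs (i + 1) _ hh (by omega), hq, hq2]
            simp
          · -- closing quote (next char is not a quote)
            rw [aLoop]
            simp only [hi, dif_pos, hq, if_pos, hh, hq2, Bool.not_true, Bool.false_eq_true,
              if_false]
            rw [(ih (i + 1) (by omega)).2 (out ++ [String.ofList (frag ++ ['"'])])]
            have hle : litEnd cs cs.length i = i + 1 := by
              rw [litEnd_irrel cs cs.length (cs.length + 1) i (by omega) (by omega), litEnd]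
              simp [hi, hq, hh, hq2]
            rw [hle, extract_cons cs i _ hi (by omega), extract_self, hq]
        · -- closing quote at end of string
          rw [aLoop]
          simp only [hi, dif_pos, hq, if_pos, hh, Bool.not_true, Bool.false_eq_true, if_false,
            dif_neg, not_false_iff]
          rw [(ih (i + 1) (by omega)).2 (out ++ [String.ofList (frag ++ ['"'])])]
          have hle : litEnd cs cs.length i = i + 1 := by
            rw [litEnd_irrel cs cs.length (cs.length + 1) i (by omega) (by omega), litEnd]
            simp [hi, hq, hh]
          rw [hle, extract_cons cs i _ hi (by omega), extract_self, hq]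
      · -- ordinary char inside the literal
        rw [aLoop]
        simp only [hi, dif_pos]
        rw [if_neg hq, (ih (i + 1) (by omega)).1 out (frag ++ [cs[i]]) (by simp)]
        have hle : litEnd cs cs.length i = litEnd cs cs.length (i + 1) := by
          rw [litEnd_irrel cs cs.length (cs.length + 1) i (by omega) (by omega), litEnd]
          simp only [hi, dif_pos]
          rw [if_neg hq]
        have he := litEnd_ge cs cs.length (i + 1)
        rw [hle, extract_cons cs i _ hi (by omega)]
        simp
    · -- non-literal mode
      intro out
      rw [nonlit cs (f + 1) i out [] h]
      cases hf : findQ cs cs.length i with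
      | none =>
        rw [bGo, hf]
        split_ifs with h1 h2 <;> simp_all
      | some j =>
        simp only []
        obtain ⟨h1, h2, h3⟩ := findQ_spec cs cs.length i j hf
        rw [bGo, hf]
        simp only []
        have he := litEnd_ge cs cs.length (j + 1)
        rw [aLoop_irrel cs (f + 1) f (j + 1) true _ _ (by omega) (by omega),
            (ih (j + 1) (by omega)).1 (out ++ [String.ofList ([] ++ cs.extract i j)]) ['"'] (by simp)]
        rw [bGo_irrel cs (cs.length + 1) cs.length (litEnd cs cs.length (j + 1)) _ (by omega) (by omega)]
        rw [extract_cons cs j _ h2 (by omega), h3]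
        simp

-- ===== VERDICT (by name: the statement is the Claim_ definition above) =====
theorem break_string_at_literals_spec : Claim_equal_break_string_at_literals := by
  intro line _
  unfold Spec_break_string_at_literals break_string_at_literals break_string_at_literals_alt
  exact (joint line.toList line.toList.length 0 (by omega)).2 []
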